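-- pv_equiv track=rewrite | github.com/francescoreconditi/trasf_wiki | backend/app/services/convert_wikitext.py | _convert_formatting
-- ===== SOURCE A (Python) =====
-- def _convert_formatting(text: str) -> str:
--     """Convert formatting markers to MediaWiki markup.
--
--     Args:
--         text: Text with formatting markers (BOLD:, ITALIC:, BOLDITALIC:)
--
--     Returns:
--         Text with MediaWiki formatting (''', '', etc.)
--     """
--     # Process text sequentially to handle markers correctly
--     result = []
--     i = 0
--     while i < len(text):
--         # Check for IMAGE marker
--         if text[i:].startswith("IMAGE:"):
--             i += 6  # len("IMAGE:")
--             # Find the end of the filename (next marker or end)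
--             end = i
--             while end < len(text):
--                 if (
--                     text[end:].startswith("BOLD:")
--                     or text[end:].startswith("ITALIC:")
--                     or text[end:].startswith("BOLDITALIC:")
--                     or text[end:].startswith("IMAGE:")
--                 ):
--                     break
--                 end += 1
--             filename = text[i:end]
--             # Extract just the filename without the /immagini/ prefix
--             clean_filename = filename.split("/")[-1] if "/" in filename else filename
--             result.append(
--                 f'<div class="img_container">[[Immagine:{clean_filename}]]</div>'
--             )
--             i = end
--         # Check for BOLDITALIC marker
--         elif text[i:].startswith("BOLDITALIC:"):
--             i += 11  # len("BOLDITALIC:")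
--             # Find the end of this formatted section (next marker or end)
--             end = i
--             while end < len(text):
--                 if (
--                     text[end:].startswith("BOLD:")
--                     or text[end:].startswith("ITALIC:")
--                     or text[end:].startswith("BOLDITALIC:")
--                     or text[end:].startswith("IMAGE:")
--                 ):
--                     break
--                 end += 1
--             result.append(f"'''''{text[i:end]}'''''")
--             i = end
--         # Check for BOLD marker
--         elif text[i:].startswith("BOLD:"):
--             i += 5  # len("BOLD:")
--             end = i
--             while end < len(text):
--                 if (
--                     text[end:].startswith("BOLD:")
--                     or text[end:].startswith("ITALIC:")
--                     or text[end:].startswith("BOLDITALIC:")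
--                     or text[end:].startswith("IMAGE:")
--                 ):
--                     break
--                 end += 1
--             result.append(f"'''{text[i:end]}'''")
--             i = end
--         # Check for ITALIC marker
--         elif text[i:].startswith("ITALIC:"):
--             i += 7  # len("ITALIC:")
--             end = i
--             while end < len(text):
--                 if (
--                     text[end:].startswith("BOLD:")
--                     or text[end:].startswith("ITALIC:")
--                     or text[end:].startswith("BOLDITALIC:")
--                     or text[end:].startswith("IMAGE:")
--                 ):
--                     break
--                 end += 1
--             result.append(f"''{text[i:end]}''")
--             i = end
--         else:
--             result.append(text[i])
--             i += 1
--
--     return "".join(result)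
-- ===== SOURCE B (Python) =====
-- import re
--
-- _MARKER_RE = re.compile(r"(BOLDITALIC:|BOLD:|IMAGE:|ITALIC:)")
--
--
-- def _convert_formatting(text: str) -> str:
--     # Tokenize once: [plain, marker, content, marker, content, ...]
--     parts = _MARKER_RE.split(text)
--     out = [parts[0]]
--     for marker, content in zip(parts[1::2], parts[2::2]):
--         if marker == "IMAGE:":
--             fn = content.split("/")[-1] if "/" in content else content
--             out.append(f'<div class="img_container">[[Immagine:{fn}]]</div>')
--         elif marker == "BOLDITALIC:":
--             out.append(f"'''''{content}'''''")
--         elif marker == "BOLD:":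
--             out.append(f"'''{content}'''")
--         else:
--             out.append(f"''{content}''")
--     return "".join(out)
-- ===== Notes on version B (the rewrite author's own statement) =====
-- stated objective: faster
-- what changed: Replaced the char-by-char while-loop with nested marker scans by a single regex split on the four markers, then rendering the (marker, content) pairs in one pass.
import Mathlib
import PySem

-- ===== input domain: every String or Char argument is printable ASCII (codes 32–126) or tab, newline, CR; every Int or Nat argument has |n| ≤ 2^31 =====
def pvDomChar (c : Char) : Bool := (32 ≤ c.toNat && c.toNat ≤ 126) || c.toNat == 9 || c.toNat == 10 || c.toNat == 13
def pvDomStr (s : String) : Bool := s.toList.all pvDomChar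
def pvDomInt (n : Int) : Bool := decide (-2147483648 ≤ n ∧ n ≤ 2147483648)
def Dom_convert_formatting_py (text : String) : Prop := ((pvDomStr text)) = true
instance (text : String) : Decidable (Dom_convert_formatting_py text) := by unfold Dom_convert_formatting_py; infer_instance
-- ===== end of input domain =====

-- B replaces A's quadratic char-by-char scanning loop by a single regex-split tokenization
-- into (marker, content) pairs rendered in one pass (objective: faster).


-- the four marker strings as char lists (String.toList does not reduce; these are
-- exactly "IMAGE:", "BOLDITALIC:", "BOLD:", "ITALIC:")
def pvImageM : List Char := ['I','M','A','G','E',':']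
def pvBoldItalicM : List Char := ['B','O','L','D','I','T','A','L','I','C',':']
def pvBoldM : List Char := ['B','O','L','D',':']
def pvItalicM : List Char := ['I','T','A','L','I','C',':']

-- generic fact cited by the ports' termination proofs
theorem pvPrefix_length_le {p l : List Char} (h : p.isPrefixOf l = true) : p.length ≤ l.length :=
  (List.isPrefixOf_iff_prefix.mp h).length_le

-- ===== PORT A =====
-- A's inner-while marker test, in A's order (BOLD:, ITALIC:, BOLDITALIC:, IMAGE:)
def pvAIsMarker (l : List Char) : Bool :=
  pvBoldM.isPrefixOf l || pvItalicM.isPrefixOf l ||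
  pvBoldItalicM.isPrefixOf l || pvImageM.isPrefixOf l

-- A's inner while loop: advance `end` until the next marker (or end of text);
-- returns (text[i:end], text[end:])
def pvAScan (l : List Char) : List Char × List Char :=
  if pvAIsMarker l then ([], l)
  else
    match l with
    | [] => ([], [])
    | c :: t => (c :: (pvAScan t).1, (pvAScan t).2)

theorem pvAScan_snd_le (l : List Char) : (pvAScan l).2.length ≤ l.length := by
  induction l with
  | nil => simp [pvAScan]
  | cons c t ih =>
    by_cases h : pvAIsMarker (c :: t)
    · simp [pvAScan, h]
    · simp [pvAScan, h]
      omega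

-- filename.split("/")[-1] if "/" in filename else filename  (exact: single-char sep)
def pvCleanFilename (f : List Char) : List Char :=
  if f.contains '/' then (f.splitOn '/').getLastD [] else f

-- A's outer while loop, branch for branch
def pvConvCore (l : List Char) : List Char :=
  if h1 : pvImageM.isPrefixOf l then
    "<div class=\"img_container\">[[Immagine:".toList
      ++ pvCleanFilename (pvAScan (l.drop 6)).1 ++ "]]</div>".toList
      ++ pvConvCore (pvAScan (l.drop 6)).2
  else if h2 : pvBoldItalicM.isPrefixOf l then
    "'''''".toList ++ (pvAScan (l.drop 11)).1 ++ "'''''".toList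
      ++ pvConvCore (pvAScan (l.drop 11)).2
  else if h3 : pvBoldM.isPrefixOf l then
    "'''".toList ++ (pvAScan (l.drop 5)).1 ++ "'''".toList
      ++ pvConvCore (pvAScan (l.drop 5)).2
  else if h4 : pvItalicM.isPrefixOf l then
    "''".toList ++ (pvAScan (l.drop 7)).1 ++ "''".toList
      ++ pvConvCore (pvAScan (l.drop 7)).2
  else
    match l with
    | [] => []
    | c :: t => c :: pvConvCore t
termination_by l.length
decreasing_by
  · have ha := pvAScan_snd_le (l.drop 6)
    have hb := pvPrefix_length_le h1
    simp only [pvImageM, List.length_cons, List.length_nil, List.length_drop] at ha hb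
    omega
  · have ha := pvAScan_snd_le (l.drop 11)
    have hb := pvPrefix_length_le h2
    simp only [pvBoldItalicM, List.length_cons, List.length_nil, List.length_drop] at ha hb
    omega
  · have ha := pvAScan_snd_le (l.drop 5)
    have hb := pvPrefix_length_le h3
    simp only [pvBoldM, List.length_cons, List.length_nil, List.length_drop] at ha hb
    omega
  · have ha := pvAScan_snd_le (l.drop 7)
    have hb := pvPrefix_length_le h4
    simp only [pvItalicM, List.length_cons, List.length_nil, List.length_drop] at ha hb
    omega
  · simp

def convert_formatting_py (text : String) : String :=
  String.ofList (pvConvCore text.toList)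

-- ===== PORT B =====
-- re.split(r"(BOLDITALIC:|BOLD:|IMAGE:|ITALIC:)", text) as a recursive tokenizer
-- (leftmost alternation order of the regex); yields [plain, marker, content, …]
def pvReSplit (l : List Char) : List (List Char) :=
  if h1 : pvBoldItalicM.isPrefixOf l then
    [] :: pvBoldItalicM :: pvReSplit (l.drop 11)
  else if h2 : pvBoldM.isPrefixOf l then
    [] :: pvBoldM :: pvReSplit (l.drop 5)
  else if h3 : pvImageM.isPrefixOf l then
    [] :: pvImageM :: pvReSplit (l.drop 6)
  else if h4 : pvItalicM.isPrefixOf l then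
    [] :: pvItalicM :: pvReSplit (l.drop 7)
  else
    match l with
    | [] => [[]]
    | c :: t =>
      match pvReSplit t with
      | [] => [[c]]
      | s :: rest => (c :: s) :: rest
termination_by l.length
decreasing_by
  · have hb := pvPrefix_length_le h1
    simp only [pvBoldItalicM, List.length_cons, List.length_nil, List.length_drop] at hb ⊢
    omega
  · have hb := pvPrefix_length_le h2
    simp only [pvBoldM, List.length_cons, List.length_nil, List.length_drop] at hb ⊢
    omega
  · have hb := pvPrefix_length_le h3
    simp only [pvImageM, List.length_cons, List.length_nil, List.length_drop] at hb ⊢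
    omega
  · have hb := pvPrefix_length_le h4
    simp only [pvItalicM, List.length_cons, List.length_nil, List.length_drop] at hb ⊢
    omega
  · simp

-- the for-loop over zip(parts[1::2], parts[2::2]): dispatch on the marker string
def pvRenderPairs : List (List Char) → List Char
  | m :: c :: rest =>
    (if m = pvImageM then
      "<div class=\"img_container\">[[Immagine:".toList
        ++ pvCleanFilename c ++ "]]</div>".toList
     else if m = pvBoldItalicM then "'''''".toList ++ c ++ "'''''".toList
     else if m = pvBoldM then "'''".toList ++ c ++ "'''".toList
     else "''".toList ++ c ++ "''".toList) ++ pvRenderPairs rest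
  | _ => []

def convert_formatting_py_alt (text : String) : String :=
  match pvReSplit text.toList with
  | [] => ""
  | p :: rest => String.ofList (p ++ pvRenderPairs rest)

-- ===== PRECONDITION & SPEC =====
def Spec_convert_formatting_py (text : String) (out : String) : Prop := out = convert_formatting_py_alt text
instance (text : String) (out : String) : Decidable (Spec_convert_formatting_py text out) := by unfold Spec_convert_formatting_py; infer_instance

-- ===== CLAIM (what is proved, stated in full; the proofs are below) =====
def Claim_equal_convert_formatting_py : Prop := ∀ (text : String), Dom_convert_formatting_py text → Spec_convert_formatting_py text (convert_formatting_py text)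

-- ===== LEMMAS AND PROOFS =====

-- two concrete markers, neither a prefix of the other, cannot both start l
theorem pvExcl {p q : List Char} (hpq : p.isPrefixOf q = false) (hqp : q.isPrefixOf p = false)
    {l : List Char} (hp : p.isPrefixOf l = true) : q.isPrefixOf l = false := by
  cases hq : q.isPrefixOf l with
  | false => rfl
  | true =>
    exfalso
    have hp' := List.isPrefixOf_iff_prefix.mp hp
    have hq' := List.isPrefixOf_iff_prefix.mp hq
    rcases le_total p.length q.length with h | h
    · have := List.isPrefixOf_iff_prefix.mpr (List.prefix_of_prefix_length_le hp' hq' h)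
      simp [this] at hpq
    · have := List.isPrefixOf_iff_prefix.mpr (List.prefix_of_prefix_length_le hq' hp' h)
      simp [this] at hqp

-- A's result is the scanned plain/content prefix followed by A on the rest
theorem pvPrefFalse {b l : List Char} (h : ¬ pvAIsMarker l = true)
    (himp : b.isPrefixOf l = true → pvAIsMarker l = true) : b.isPrefixOf l = false := by
  rcases Bool.eq_false_or_eq_true (b.isPrefixOf l) with hx | hx
  · exact absurd (himp hx) h
  · exact hx

theorem pvMarkerFalse (l : List Char) (h : ¬ pvAIsMarker l = true) :
    pvBoldM.isPrefixOf l = false ∧ pvItalicM.isPrefixOf l = false ∧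
    pvBoldItalicM.isPrefixOf l = false ∧ pvImageM.isPrefixOf l = false :=
  ⟨pvPrefFalse h (fun hx => by simp [pvAIsMarker, hx]),
   pvPrefFalse h (fun hx => by simp [pvAIsMarker, hx]),
   pvPrefFalse h (fun hx => by simp [pvAIsMarker, hx]),
   pvPrefFalse h (fun hx => by simp [pvAIsMarker, hx])⟩

-- A's result is the scanned plain/content prefix followed by A on the rest
theorem pvA1 (l : List Char) : pvConvCore l = (pvAScan l).1 ++ pvConvCore (pvAScan l).2 := by
  induction l with
  | nil => simp [pvAScan, pvAIsMarker]
  | cons c t ih =>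
    by_cases h : pvAIsMarker (c :: t)
    · simp [pvAScan, h]
    · have hs : pvAScan (c :: t) = (c :: (pvAScan t).1, (pvAScan t).2) := by
        simp [pvAScan, h]
      obtain ⟨hB, hIT, hBI, hIm⟩ := pvMarkerFalse _ h
      rw [hs]
      rw [pvConvCore]
      simp only [hIm, hBI, hB, hIT, Bool.false_eq_true, dite_false]
      simp [ih]

-- shape of the regex split: head is the scanned prefix, and rendering the tail
-- equals A's conversion of the remaining text
theorem pvBoolFalse {b : Bool} (h : ¬ b = true) : b = false := by
  cases b
  · rfl
  · exact absurd rfl h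

theorem pvNeTrue {b : Bool} (h : b = false) : ¬ b = true := by simp [h]

theorem pvIm_false_of_BI {l : List Char} (h : pvBoldItalicM.isPrefixOf l = true) :
    pvImageM.isPrefixOf l = false := pvExcl (by decide) (by decide) h

theorem pvIm_false_of_B {l : List Char} (h : pvBoldM.isPrefixOf l = true) :
    pvImageM.isPrefixOf l = false := pvExcl (by decide) (by decide) h

theorem pvIm_false_of_IT {l : List Char} (h : pvItalicM.isPrefixOf l = true) :
    pvImageM.isPrefixOf l = false := pvExcl (by decide) (by decide) h

theorem pvRenderPairs_cons (m c : List Char) (rest : List (List Char)) :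
    pvRenderPairs (m :: c :: rest) =
      (if m = pvImageM then
        "<div class=\"img_container\">[[Immagine:".toList
          ++ pvCleanFilename c ++ "]]</div>".toList
       else if m = pvBoldItalicM then "'''''".toList ++ c ++ "'''''".toList
       else if m = pvBoldM then "'''".toList ++ c ++ "'''".toList
       else "''".toList ++ c ++ "''".toList) ++ pvRenderPairs rest := rfl

theorem pvSplitSpec : ∀ (n : Nat) (l : List Char), l.length ≤ n →
    (pvReSplit l).head? = some ((pvAScan l).1) ∧
    pvRenderPairs ((pvReSplit l).tail) = pvConvCore ((pvAScan l).2) := by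
  intro n
  induction n with
  | zero =>
    intro l hl
    have hnil : l = [] := List.length_eq_zero_iff.mp (Nat.le_zero.mp hl)
    subst hnil
    constructor
    · rw [pvReSplit.eq_def, pvAScan.eq_def]
      simp [pvAIsMarker, pvBoldItalicM, pvBoldM, pvImageM, pvItalicM]
    · rw [pvReSplit.eq_def, pvAScan.eq_def, pvConvCore.eq_def]
      simp [pvAIsMarker, pvRenderPairs, pvBoldItalicM, pvBoldM, pvImageM, pvItalicM]
  | succ n ih =>
    intro l hl
    by_cases hBI : pvBoldItalicM.isPrefixOf l
    · -- BOLDITALIC marker at the head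
      have hmark : pvAIsMarker l = true := by simp [pvAIsMarker, hBI]
      have hscan : pvAScan l = ([], l) := by rw [pvAScan.eq_def]; simp [hmark]
      have hlen : 11 ≤ l.length := by
        have := pvPrefix_length_le hBI
        simpa [pvBoldItalicM] using this
      obtain ⟨ih1, ih2⟩ := ih (l.drop 11) (by simp; omega)
      cases hsp : pvReSplit (l.drop 11) with
      | nil => rw [hsp] at ih1; simp at ih1
      | cons s rest =>
        rw [hsp] at ih1 ih2
        simp only [List.head?_cons, Option.some.injEq, List.tail_cons] at ih1 ih2
        constructor
        · rw [pvReSplit.eq_def, dif_pos hBI, hscan]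
          simp
        · rw [pvReSplit.eq_def, dif_pos hBI, hsp, hscan]
          simp only [List.tail_cons]
          rw [pvRenderPairs_cons, pvConvCore.eq_def, dif_neg (pvNeTrue (pvIm_false_of_BI hBI)), dif_pos hBI]
          rw [if_neg (by decide), if_pos rfl]
          rw [ih1, ih2]
    by_cases hB : pvBoldM.isPrefixOf l
    · -- BOLD marker at the head
      have hmark : pvAIsMarker l = true := by simp [pvAIsMarker, hB]
      have hscan : pvAScan l = ([], l) := by rw [pvAScan.eq_def]; simp [hmark]
      have hlen : 5 ≤ l.length := by
        have := pvPrefix_length_le hB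
        simpa [pvBoldM] using this
      obtain ⟨ih1, ih2⟩ := ih (l.drop 5) (by simp; omega)
      cases hsp : pvReSplit (l.drop 5) with
      | nil => rw [hsp] at ih1; simp at ih1
      | cons s rest =>
        rw [hsp] at ih1 ih2
        simp only [List.head?_cons, Option.some.injEq, List.tail_cons] at ih1 ih2
        constructor
        · rw [pvReSplit.eq_def, dif_neg hBI, dif_pos hB, hscan]
          simp
        · rw [pvReSplit.eq_def, dif_neg hBI, dif_pos hB, hsp, hscan]
          simp only [List.tail_cons]
          rw [pvRenderPairs_cons, pvConvCore.eq_def, dif_neg (pvNeTrue (pvIm_false_of_B hB)), dif_neg hBI, dif_pos hB]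
          rw [if_neg (by decide), if_neg (by decide), if_pos rfl]
          rw [ih1, ih2]
    by_cases hIm : pvImageM.isPrefixOf l
    · -- IMAGE marker at the head
      have hmark : pvAIsMarker l = true := by simp [pvAIsMarker, hIm]
      have hscan : pvAScan l = ([], l) := by rw [pvAScan.eq_def]; simp [hmark]
      have hlen : 6 ≤ l.length := by
        have := pvPrefix_length_le hIm
        simpa [pvImageM] using this
      obtain ⟨ih1, ih2⟩ := ih (l.drop 6) (by simp; omega)
      cases hsp : pvReSplit (l.drop 6) with
      | nil => rw [hsp] at ih1; simp at ih1
      | cons s rest =>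
        rw [hsp] at ih1 ih2
        simp only [List.head?_cons, Option.some.injEq, List.tail_cons] at ih1 ih2
        constructor
        · rw [pvReSplit.eq_def, dif_neg hBI, dif_neg hB, dif_pos hIm, hscan]
          simp
        · rw [pvReSplit.eq_def, dif_neg hBI, dif_neg hB, dif_pos hIm, hsp, hscan]
          simp only [List.tail_cons]
          rw [pvRenderPairs_cons, pvConvCore.eq_def, dif_pos hIm]
          rw [if_pos rfl]
          rw [ih1, ih2]
    by_cases hIT : pvItalicM.isPrefixOf l
    · -- ITALIC marker at the head
      have hmark : pvAIsMarker l = true := by simp [pvAIsMarker, hIT]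
      have hscan : pvAScan l = ([], l) := by rw [pvAScan.eq_def]; simp [hmark]
      have hlen : 7 ≤ l.length := by
        have := pvPrefix_length_le hIT
        simpa [pvItalicM] using this
      obtain ⟨ih1, ih2⟩ := ih (l.drop 7) (by simp; omega)
      cases hsp : pvReSplit (l.drop 7) with
      | nil => rw [hsp] at ih1; simp at ih1
      | cons s rest =>
        rw [hsp] at ih1 ih2
        simp only [List.head?_cons, Option.some.injEq, List.tail_cons] at ih1 ih2
        constructor
        · rw [pvReSplit.eq_def, dif_neg hBI, dif_neg hB, dif_neg hIm, dif_pos hIT, hscan]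
          simp
        · rw [pvReSplit.eq_def, dif_neg hBI, dif_neg hB, dif_neg hIm, dif_pos hIT, hsp, hscan]
          simp only [List.tail_cons]
          rw [pvRenderPairs_cons, pvConvCore.eq_def, dif_neg (pvNeTrue (pvIm_false_of_IT hIT)), dif_neg hBI, dif_neg hB, dif_pos hIT]
          rw [if_neg (by decide), if_neg (by decide), if_neg (by decide)]
          rw [ih1, ih2]
    -- no marker at the head
    have hmark : pvAIsMarker l = false := by
      simp [pvAIsMarker, pvBoolFalse hBI, pvBoolFalse hB, pvBoolFalse hIm, pvBoolFalse hIT]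
    cases l with
    | nil =>
      constructor
      · rw [pvReSplit.eq_def, pvAScan.eq_def]
        simp [pvAIsMarker, pvBoldItalicM, pvBoldM, pvImageM, pvItalicM]
      · rw [pvReSplit.eq_def, pvAScan.eq_def, pvConvCore.eq_def]
        simp [pvAIsMarker, pvRenderPairs, pvBoldItalicM, pvBoldM, pvImageM, pvItalicM]
    | cons c t =>
      have htl : t.length ≤ n := by simp at hl; omega
      obtain ⟨ih1, ih2⟩ := ih t htl
      cases hsp : pvReSplit t with
      | nil => rw [hsp] at ih1; simp at ih1
      | cons s rest =>
        rw [hsp] at ih1 ih2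
        simp only [List.head?_cons, Option.some.injEq, List.tail_cons] at ih1 ih2
        have hscan : pvAScan (c :: t) = (c :: (pvAScan t).1, (pvAScan t).2) := by
          rw [pvAScan.eq_def]; simp [hmark]
        have hcore : pvConvCore (c :: t) = c :: pvConvCore t := by
          rw [pvConvCore.eq_def, dif_neg hIm, dif_neg hBI, dif_neg hB, dif_neg hIT]
        constructor
        · rw [pvReSplit.eq_def, dif_neg hBI, dif_neg hB, dif_neg hIm, dif_neg hIT]
          show (match pvReSplit t with
                | [] => [[c]]
                | s :: rest => (c :: s) :: rest).head? = some ((pvAScan (c :: t)).1)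
          rw [hsp, hscan]
          simp [ih1]
        · rw [pvReSplit.eq_def, dif_neg hBI, dif_neg hB, dif_neg hIm, dif_neg hIT]
          show pvRenderPairs (match pvReSplit t with
                | [] => [[c]]
                | s :: rest => (c :: s) :: rest).tail = pvConvCore ((pvAScan (c :: t)).2)
          rw [hsp, hscan]
          simp [ih2]

-- ===== VERDICT (by name: the statement is the Claim_ definition above) =====
theorem convert_formatting_py_spec : Claim_equal_convert_formatting_py := by
  intro text _
  unfold Spec_convert_formatting_py convert_formatting_py convert_formatting_py_alt
  obtain ⟨h1, h2⟩ := pvSplitSpec text.toList.length text.toList le_rfl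
  cases hsp : pvReSplit text.toList with
  | nil => rw [hsp] at h1; simp at h1
  | cons p rest =>
    rw [hsp] at h1 h2
    simp at h1 h2
    rw [pvA1 text.toList, ← h1, ← h2]
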